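-- pv_equiv track=rewrite | github.com/BrandonBinf/python_scripts_mega_repo | malaria_project_scripts/MUT_scripts/scan4m6a_RAC_only_MUT.py | find_m6_motifs
-- ===== SOURCE A (Python) =====
-- def find_m6_motifs(orfs_data):
-- 	motif_coords = []
-- 	all_motifs = ["AAC", "GAC"]
-- 	for coords, sequence in orfs_data.items():
-- 		orf_start = coords[0]
-- 		orf_end = coords[1]
-- 		for motif in all_motifs:
-- 				index = 0 #search index
-- 				while True:
-- 					rel_motif_start = sequence.find(motif, index)
-- 					if rel_motif_start == -1:
-- 						break
-- 					abs_motif_start = orf_start + rel_motif_start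
-- 					abs_motif_end = abs_motif_start + len(motif)
-- 					motif_coords.append((abs_motif_start, abs_motif_end))
-- 					index = rel_motif_start + 1
-- 	return motif_coords
-- ===== SOURCE B (Python) =====
-- def find_m6_motifs(orfs_data):
--     motif_coords = []
--     for (orf_start, orf_end), sequence in orfs_data.items():
--         aac_list = []
--         gac_list = []
--         for i in range(len(sequence) - 2):
--             window = sequence[i:i+3]
--             if window == "AAC":
--                 aac_list.append((orf_start + i, orf_start + i + 3))
--             elif window == "GAC":
--                 gac_list.append((orf_start + i, orf_start + i + 3))
--         motif_coords.extend(aac_list)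
--         motif_coords.extend(gac_list)
--     return motif_coords
-- ===== Notes on version B (the rewrite author's own statement) =====
-- stated objective: simpler
-- what changed: Replaces A's two repeated str.find restart loops per ORF with a single linear scan over the sequence that inspects each 3-char window once and keeps two buckets (AAC hits, then GAC hits), appended after the scan.
import Mathlib
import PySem

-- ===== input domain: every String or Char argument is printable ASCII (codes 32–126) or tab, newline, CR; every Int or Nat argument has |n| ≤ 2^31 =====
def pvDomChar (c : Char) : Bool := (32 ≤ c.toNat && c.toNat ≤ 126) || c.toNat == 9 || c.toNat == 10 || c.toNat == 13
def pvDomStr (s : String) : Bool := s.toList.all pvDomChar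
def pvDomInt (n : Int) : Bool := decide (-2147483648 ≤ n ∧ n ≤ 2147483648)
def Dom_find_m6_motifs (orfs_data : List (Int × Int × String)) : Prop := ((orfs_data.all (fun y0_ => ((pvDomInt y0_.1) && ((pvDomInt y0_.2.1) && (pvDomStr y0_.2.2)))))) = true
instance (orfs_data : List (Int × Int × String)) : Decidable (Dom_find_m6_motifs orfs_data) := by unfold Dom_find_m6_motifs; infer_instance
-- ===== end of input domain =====

-- B replaces A's two repeated str.find scan loops per ORF by one linear pass over the
-- sequence maintaining two buckets (AAC hits, GAC hits); same return value, simpler single traversal.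

-- The Python parameter is a dict {(start,end): sequence}; per the type convention it arrives as an
-- association list, marshalled to the dict (last duplicate key wins, first position) exactly as
-- Python's dict construction does.  Both ports share this input marshalling.
def pvItems (orfs_data : List (Int × Int × String)) : List ((Int × Int) × String) :=
  (PySem.Dict.ofList (orfs_data.map (fun x => ((x.1, x.2.1), x.2.2)))).items

-- ===== PORT A =====
-- A's inner 'while True' find-loop for one motif: emit (start+rel, start+rel+len(motif)) for each
-- occurrence, continuing the search at rel+1.  Fuel = len(sequence)+1 bounds the iterations
-- (each step moves the search index strictly forward); it is a totality guard only.
def pvLoopA (orf_start : Int) (s m : List Char) : Nat → Nat → List (Int × Int)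
  | 0, _ => []
  | fuel + 1, idx =>
    let r := PySem.Chars.findFrom s m (idx : Int) none
    if r = -1 then []
    else (orf_start + r, orf_start + r + (m.length : Int)) :: pvLoopA orf_start s m fuel (r.toNat + 1)

def find_m6_motifs (orfs_data : List (Int × Int × String)) : List (Int × Int) :=
  (pvItems orfs_data).foldl
    (fun motif_coords it =>
      let orf_start := it.1.1
      let s := it.2.toList
      ["AAC".toList, "GAC".toList].foldl
        (fun acc m => acc ++ pvLoopA orf_start s m (s.length + 1) 0) motif_coords)
    []

-- ===== PORT B =====
-- B's single scan: for i in range(len(sequence)-2), look at the window sequence[i:i+3] and put the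
-- coordinate pair into the AAC bucket or the GAC bucket; then extend the result with both buckets.
def pvScanB (orf_start : Int) (s : List Char) : List (Int × Int) × List (Int × Int) :=
  (PySem.List.pyRange 0 ((s.length : Int) - 2) 1).foldl
    (fun p i =>
      let window := PySem.List.slice s (some i) (some (i + 3))
      if window = "AAC".toList then (p.1 ++ [(orf_start + i, orf_start + i + 3)], p.2)
      else if window = "GAC".toList then (p.1, p.2 ++ [(orf_start + i, orf_start + i + 3)])
      else p)
    ([], [])

def find_m6_motifs_alt (orfs_data : List (Int × Int × String)) : List (Int × Int) :=
  (pvItems orfs_data).foldl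
    (fun motif_coords it =>
      let bk := pvScanB it.1.1 it.2.toList
      motif_coords ++ bk.1 ++ bk.2)
    []

-- ===== PRECONDITION & SPEC =====
def Spec_find_m6_motifs (orfs_data : List (Int × Int × String)) (out : List (Int × Int)) : Prop := out = find_m6_motifs_alt orfs_data
instance (orfs_data : List (Int × Int × String)) (out : List (Int × Int)) : Decidable (Spec_find_m6_motifs orfs_data out) := by unfold Spec_find_m6_motifs; infer_instance

-- ===== CLAIM (what is proved, stated in full; the proofs are below) =====
def Claim_equal_find_m6_motifs : Prop := ∀ (orfs_data : List (Int × Int × String)), Dom_find_m6_motifs orfs_data → Spec_find_m6_motifs orfs_data (find_m6_motifs orfs_data)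

-- ===== LEMMAS AND PROOFS =====

-- occurrences of m in s at positions ≥ k, in increasing order
def pvOcc (m s : List Char) (k : Nat) : List Nat :=
  (List.range' k (s.length - k)).filter (fun i => decide (m <+: s.drop i))

lemma pvOcc_nil (m s : List Char) (k : Nat) (h : ¬ m <:+: s.drop k) : pvOcc m s k = [] := by
  unfold pvOcc
  rw [List.filter_eq_nil_iff]
  intro i hi
  rw [List.mem_range'_1] at hi
  simp only [decide_eq_true_eq]
  intro hpre
  apply h
  have hd : s.drop i = (s.drop k).drop (i - k) := by
    rw [List.drop_drop]; congr 1; omega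
  rw [hd] at hpre
  exact hpre.isInfix.trans (List.drop_suffix _ _).isInfix

lemma pvOcc_cons (m s : List Char) (k j : Nat) (hk : k ≤ j) (hj : j < s.length)
    (hpre : m <+: s.drop j) (hmin : ∀ i, k ≤ i → i < j → ¬ m <+: s.drop i) :
    pvOcc m s k = j :: pvOcc m s (j + 1) := by
  unfold pvOcc
  have hsplit : List.range' k (s.length - k) = List.range' k (j - k) ++ List.range' j (s.length - j) := by
    have h := (List.range'_append_1 (s := k) (m := j - k) (n := s.length - j))
    rw [show k + (j - k) = j by omega] at h
    rw [show s.length - k = (j - k) + (s.length - j) by omega]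
    exact h.symm
  rw [hsplit, List.filter_append]
  have h1 : (List.range' k (j - k)).filter (fun i => decide (m <+: s.drop i)) = [] := by
    rw [List.filter_eq_nil_iff]
    intro i hi
    rw [List.mem_range'_1] at hi
    simp only [decide_eq_true_eq]
    exact hmin i hi.1 (by omega)
  have h2 : List.range' j (s.length - j) = j :: List.range' (j + 1) (s.length - (j + 1)) := by
    rw [show s.length - j = (s.length - (j + 1)) + 1 by omega, List.range'_succ]
  rw [h1, h2]
  simp [hpre]

lemma pvLoopA_eq (orf_start : Int) (s m : List Char) (hm : m ≠ []) :
    ∀ fuel k, k ≤ s.length → s.length + 1 - k ≤ fuel →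
    pvLoopA orf_start s m fuel k
      = (pvOcc m s k).map (fun i : Nat => (orf_start + (i : Int), orf_start + (i : Int) + (m.length : Int))) := by
  intro fuel
  induction fuel with
  | zero => intro k hk hf; omega
  | succ fuel ih =>
    intro k hk hf
    simp only [pvLoopA]
    by_cases h : PySem.Chars.findFrom s m (k : Int) none = -1
    · rw [if_pos h]
      have hni : ¬ m <:+: s.drop k := (PySem.Chars.findFrom_natCast_eq_neg_one_iff s m k hk).mp h
      rw [pvOcc_nil m s k hni]
      simp
    · rw [if_neg h]
      obtain ⟨hle, hpre, hmin⟩ := PySem.Chars.findFrom_natCast_spec s m k hk h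
      set r := PySem.Chars.findFrom s m (k : Int) none with hrdef
      have hj : r = ((r.toNat : Nat) : Int) := by omega
      have hjlt : r.toNat < s.length := by
        by_contra hge
        have : s.drop r.toNat = [] := List.drop_eq_nil_of_le (by omega)
        rw [this] at hpre
        exact hm (List.prefix_nil.mp hpre)
      have hklej : k ≤ r.toNat := by omega
      rw [pvOcc_cons m s k r.toNat hklej hjlt hpre (fun i h1 h2 => hmin i h1 h2)]
      rw [List.map_cons, ih (r.toNat + 1) (by omega) (by omega)]
      congr 2 <;> omega

lemma pvBucket (orf_start : Int) (s : List Char) (l : List Nat) (a0 g0 : List (Int × Int)) :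
    l.foldl (fun p k =>
        if (s.drop k).take 3 = "AAC".toList then (p.1 ++ [(orf_start + (k : Int), orf_start + (k : Int) + 3)], p.2)
        else if (s.drop k).take 3 = "GAC".toList then (p.1, p.2 ++ [(orf_start + (k : Int), orf_start + (k : Int) + 3)])
        else p) (a0, g0)
      = (a0 ++ (l.filter (fun k => decide ((s.drop k).take 3 = "AAC".toList))).map
            (fun i : Nat => (orf_start + (i : Int), orf_start + (i : Int) + 3)),
         g0 ++ (l.filter (fun k => decide ((s.drop k).take 3 = "GAC".toList))).map
            (fun i : Nat => (orf_start + (i : Int), orf_start + (i : Int) + 3))) := by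
  induction l generalizing a0 g0 with
  | nil => simp
  | cons k t ih =>
    simp only [List.foldl_cons]
    by_cases hA : (s.drop k).take 3 = "AAC".toList
    · have hG : ¬ (s.drop k).take 3 = "GAC".toList := by rw [hA]; decide
      rw [if_pos hA, ih,
          List.filter_cons_of_pos (by simpa using hA),
          List.filter_cons_of_neg (by simpa using hG)]
      simp
    · rw [if_neg hA]
      by_cases hG : (s.drop k).take 3 = "GAC".toList
      · rw [if_pos hG, ih,
            List.filter_cons_of_neg (by simpa using hA),
            List.filter_cons_of_pos (by simpa using hG)]
        simp
      · rw [if_neg hG, ih,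
            List.filter_cons_of_neg (by simpa using hA),
            List.filter_cons_of_neg (by simpa using hG)]

lemma pvOcc_zero (m s : List Char) (hm : m.length = 3) :
    pvOcc m s 0 = (List.range (s.length - 2)).filter (fun k => decide ((s.drop k).take 3 = m)) := by
  unfold pvOcc
  rw [Nat.sub_zero]
  have hpred : ∀ i ∈ List.range' 0 s.length,
      decide (m <+: s.drop i) = decide ((s.drop i).take 3 = m) := by
    intro i _
    have : (m <+: s.drop i) ↔ ((s.drop i).take 3 = m) := by
      rw [List.prefix_iff_eq_take, ← hm]
      exact ⟨fun h => h.symm, fun h => h.symm⟩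
    simp [this]
  rw [List.filter_congr hpred]
  have hsplit : List.range' 0 (s.length - 2) ++ List.range' (s.length - 2) (s.length - (s.length - 2))
      = List.range' 0 s.length := by
    have h := (List.range'_append_1 (s := 0) (m := s.length - 2) (n := s.length - (s.length - 2)))
    rw [Nat.zero_add] at h
    rw [h]
    congr 1
    omega
  rw [← hsplit, List.filter_append, ← List.range_eq_range']
  have htail : (List.range' (s.length - 2) (s.length - (s.length - 2))).filter
      (fun i => decide ((s.drop i).take 3 = m)) = [] := by
    rw [List.filter_eq_nil_iff]
    intro i hi
    rw [List.mem_range'_1] at hi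
    simp only [decide_eq_true_eq]
    intro heq
    have hlen : ((s.drop i).take 3).length = m.length := by rw [heq]
    rw [List.length_take, List.length_drop, hm] at hlen
    omega
  rw [htail, List.append_nil]

lemma pvScanB_eq (orf_start : Int) (s : List Char) :
    pvScanB orf_start s
      = ((pvOcc "AAC".toList s 0).map (fun i : Nat => (orf_start + (i : Int), orf_start + (i : Int) + 3)),
         (pvOcc "GAC".toList s 0).map (fun i : Nat => (orf_start + (i : Int), orf_start + (i : Int) + 3))) := by
  unfold pvScanB
  rw [PySem.List.pyRange_one 0 ((s.length : Int) - 2), List.foldl_map]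
  rw [show ((s.length : Int) - 2 - 0).toNat = s.length - 2 by omega]
  have hwin : ∀ k : Nat, PySem.List.slice s (some ((k : Nat) : Int)) (some (((k : Nat) : Int) + 3))
      = (s.drop k).take 3 := by
    intro k
    rw [show (((k : Nat) : Int) + 3) = (((k + 3 : Nat) : Nat) : Int) by push_cast; ring]
    rw [PySem.List.slice_natCast]
    congr 1
    omega
  simp only [zero_add]
  simp only [hwin]
  rw [pvBucket orf_start s (List.range (s.length - 2)) [] []]
  rw [pvOcc_zero "AAC".toList s rfl, pvOcc_zero "GAC".toList s rfl]
  simp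

-- ===== VERDICT (by name: the statement is the Claim_ definition above) =====
theorem find_m6_motifs_spec : Claim_equal_find_m6_motifs := by
  intro orfs_data _
  unfold Spec_find_m6_motifs find_m6_motifs find_m6_motifs_alt
  congr 1
  funext motif_coords it
  simp only [List.foldl_cons, List.foldl_nil]
  rw [pvLoopA_eq it.1.1 it.2.toList "AAC".toList (by decide) (it.2.toList.length + 1) 0
        (Nat.zero_le _) (by omega),
      pvLoopA_eq it.1.1 it.2.toList "GAC".toList (by decide) (it.2.toList.length + 1) 0
        (Nat.zero_le _) (by omega),
      pvScanB_eq it.1.1 it.2.toList]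
  simp [List.append_assoc]
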